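-- pv_equiv track=rewrite | github.com/intv0id/RIAI | analyzer_new.py | predict_label
-- ===== SOURCE A (Python) =====
-- def predict_label(lb, ub):
--     nr_labels = len(lb)
--     predicted_label = 0
--     predicted_flag = False
--
--     for i in range(nr_labels):
--         flag = True
--         for j in range(nr_labels):
--             if(j != i):
--                 if(lb[i] <= ub[j]):
--                     flag = False
--                     break
--
--         if(flag):
--             predicted_label = i
--             predicted_flag = True
--             break
--
--     return predicted_label, predicted_flag
-- ===== SOURCE B (Python) =====
-- def predict_label(lb, ub):
--     n = len(lb)
--     # one pass: largest ub value, its first index, and the best value excluding that index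
--     best = second = None
--     best_i = -1
--     for j in range(n):
--         v = ub[j]
--         if best is None or v > best:
--             second = best
--             best = v
--             best_i = j
--         elif second is None or v > second:
--             second = v
--     for i in range(n):
--         m = second if i == best_i else best
--         if m is None or lb[i] > m:
--             return i, True
--     return 0, False
-- ===== Notes on version B (the rewrite author's own statement) =====
-- stated objective: faster
-- what changed: replaces the quadratic all-pairs inner scan by one pass computing the max and second-max of ub (with the argmax index), so each candidate i is checked in O(1) against the max of ub excluding i
-- outside the precondition, e.g. on predict_label([5], []): A returns (0, True), B raises IndexError; on predict_label([0, 0, 0], [9, 9]): A returns (0, False), B raises IndexError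
import Mathlib
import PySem

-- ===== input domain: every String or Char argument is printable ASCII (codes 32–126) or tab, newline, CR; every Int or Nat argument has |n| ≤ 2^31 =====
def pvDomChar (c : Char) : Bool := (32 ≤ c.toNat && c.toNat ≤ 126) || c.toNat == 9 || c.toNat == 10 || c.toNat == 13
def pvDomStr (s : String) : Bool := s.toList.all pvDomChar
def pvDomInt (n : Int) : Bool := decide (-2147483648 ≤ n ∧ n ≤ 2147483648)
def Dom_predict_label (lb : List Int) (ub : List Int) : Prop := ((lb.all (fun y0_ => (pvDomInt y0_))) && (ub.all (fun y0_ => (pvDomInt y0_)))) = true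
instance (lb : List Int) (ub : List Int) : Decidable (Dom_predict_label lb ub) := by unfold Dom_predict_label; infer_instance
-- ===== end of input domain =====

-- B replaces A's quadratic all-pairs scan by one pass computing the max / second-max of ub
-- (with the argmax index), so each candidate i is checked in O(1); objective: faster.

-- ===== PORT A =====
-- inner 'for j in range(nr_labels)' loop with break: false as soon as j != i and lb[i] <= ub[j]
def aInner (lb : List Int) (ub : List Int) (i : Int) : List Int → Bool
  | [] => true
  | j :: js =>
      if j ≠ i then
        if PySem.List.pyGetD lb i 0 ≤ PySem.List.pyGetD ub j 0 then false
        else aInner lb ub i js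
      else aInner lb ub i js

-- outer 'for i in range(nr_labels)' loop with break on flag
def aOuter (lb : List Int) (ub : List Int) (n : Int) : List Int → Int × Bool
  | [] => (0, false)
  | i :: is =>
      if aInner lb ub i (PySem.List.pyRange 0 n 1) then (i, true)
      else aOuter lb ub n is

def predict_label (lb : List Int) (ub : List Int) : Int × Bool :=
  aOuter lb ub (lb.length : Int) (PySem.List.pyRange 0 (lb.length : Int) 1)

-- ===== PORT B =====
-- first pass of Source B: (best, second, best_i) over j in range(n)
def bScan (ub : List Int) (st : Option Int × Option Int × Int) : List Int → Option Int × Option Int × Int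
  | [] => st
  | j :: js =>
      let v := PySem.List.pyGetD ub j 0
      let st' :=
        match st with
        | (best, second, bi) =>
          match best with
          | none => (some v, second, j)
          | some b =>
            if v > b then (some v, some b, j)
            else
              match second with
              | none => (some b, some v, bi)
              | some s => if v > s then (some b, some v, bi) else (some b, some s, bi)
      bScan ub st' js

-- second pass of Source B: first i with lb[i] > (second if i == best_i else best), None = -inf
def bFind (lb : List Int) (best second : Option Int) (bi : Int) : List Int → Int × Bool
  | [] => (0, false)
  | i :: is =>
      match (if i = bi then second else best) with
      | none => (i, true)
      | some m => if PySem.List.pyGetD lb i 0 > m then (i, true) else bFind lb best second bi is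

def predict_label_alt (lb : List Int) (ub : List Int) : Int × Bool :=
  let n : Int := (lb.length : Int)
  match bScan ub (none, none, -1) (PySem.List.pyRange 0 n 1) with
  | (best, second, bi) => bFind lb best second bi (PySem.List.pyRange 0 n 1)

-- ===== PRECONDITION & SPEC =====
-- Pre_ excludes inputs with len(ub) < len(lb): on those Python A raises IndexError unless an
-- early break hides the short ub (then A still returns, but B's single scan of ub[0:len(lb)]
-- raises IndexError there, so they lie outside the claim).
def Pre_predict_label (lb : List Int) (ub : List Int) : Prop := lb.length ≤ ub.length
instance (lb : List Int) (ub : List Int) : Decidable (Pre_predict_label lb ub) := by unfold Pre_predict_label; infer_instance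
def pvWitness_predict_label : List Int × List Int := ([3, 0], [1, 2])

def Spec_predict_label (lb : List Int) (ub : List Int) (out : Int × Bool) : Prop := out = predict_label_alt lb ub
instance (lb : List Int) (ub : List Int) (out : Int × Bool) : Decidable (Spec_predict_label lb ub out) := by unfold Spec_predict_label; infer_instance

-- ===== CLAIM (what is proved, stated in full; the proofs are below) =====
def Claim_equal_predict_label : Prop := ∀ (lb : List Int) (ub : List Int), Dom_predict_label lb ub → Pre_predict_label lb ub → Spec_predict_label lb ub (predict_label lb ub)

-- ===== LEMMAS AND PROOFS =====

-- invariant of bScan after processing the index list `pre`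
def scanInv (ub : List Int) (pre : List Int) : Option Int × Option Int × Int → Prop
  | (none, second, bi) => pre = [] ∧ second = none ∧ bi = -1
  | (some b, second, bi) =>
      bi ∈ pre ∧ PySem.List.pyGetD ub bi 0 = b ∧ (∀ j ∈ pre, PySem.List.pyGetD ub j 0 ≤ b) ∧
      match second with
      | none => ∀ j ∈ pre, j = bi
      | some s => (∃ j ∈ pre, j ≠ bi ∧ PySem.List.pyGetD ub j 0 = s) ∧
                  (∀ j ∈ pre, j ≠ bi → PySem.List.pyGetD ub j 0 ≤ s)

theorem bScan_inv (ub : List Int) : ∀ (js pre : List Int) (st : Option Int × Option Int × Int),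
    (pre ++ js).Nodup → scanInv ub pre st → scanInv ub (pre ++ js) (bScan ub st js) := by
  intro js
  induction js with
  | nil => intro pre st _ h; simpa using h
  | cons j js ih =>
      intro pre st hnd hInv
      have hjpre : j ∉ pre := by
        have := List.disjoint_of_nodup_append hnd
        intro hmem; exact (this hmem) (by simp)
      have hnd' : ((pre ++ [j]) ++ js).Nodup := by
        simpa [List.append_assoc] using hnd
      have hfin : pre ++ [j] ++ js = pre ++ j :: js := by simp [List.append_assoc]
      obtain ⟨best, second, bi⟩ := st
      match best with
      | none =>
          obtain ⟨hpre, hsec, hbi⟩ := hInv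
          subst hpre hsec hbi
          have hstep : scanInv ub ([] ++ [j]) (some (PySem.List.pyGetD ub j 0), none, j) := by
            refine ⟨by simp, rfl, by simp, by simp⟩
          have := ih ([] ++ [j]) _ hnd' hstep
          rw [hfin] at this
          simpa [bScan] using this
      | some b =>
          obtain ⟨hbi, hval, hub, hsec⟩ := hInv
          have hbij : bi ≠ j := fun h => hjpre (h ▸ hbi)
          by_cases hvb : PySem.List.pyGetD ub j 0 > b
          · have hstep : scanInv ub (pre ++ [j]) (some (PySem.List.pyGetD ub j 0), some b, j) := by
              refine ⟨by simp, rfl, ?_, ⟨bi, by simp [hbi], hbij, hval⟩, ?_⟩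
              · intro j' hj'
                rcases (List.mem_append.mp hj') with h | h
                · exact le_of_lt (lt_of_le_of_lt (hub j' h) hvb)
                · simp at h; subst h; exact le_refl _
              · intro j' hj' hne
                rcases (List.mem_append.mp hj') with h | h
                · exact hub j' h
                · simp at h; exact absurd h hne
            have := ih (pre ++ [j]) _ hnd' hstep
            rw [hfin] at this
            simpa [bScan, hvb] using this
          · push Not at hvb
            match second with
            | none =>
                have hstep : scanInv ub (pre ++ [j]) (some b, some (PySem.List.pyGetD ub j 0), bi) := by
                  refine ⟨by simp [hbi], hval, ?_, ⟨j, by simp, fun h => hbij h.symm, rfl⟩, ?_⟩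
                  · intro j' hj'
                    rcases (List.mem_append.mp hj') with h | h
                    · exact hub j' h
                    · simp at h; subst h; exact hvb
                  · intro j' hj' hne
                    rcases (List.mem_append.mp hj') with h | h
                    · exact absurd (hsec j' h) hne
                    · simp at h; subst h; exact le_refl _
                have := ih (pre ++ [j]) _ hnd' hstep
                rw [hfin] at this
                simpa [bScan, not_lt.mpr hvb] using this
            | some s =>
                obtain ⟨⟨j0, hj0, hj0ne, hj0v⟩, hbnd⟩ := hsec
                by_cases hvs : PySem.List.pyGetD ub j 0 > s
                · have hstep : scanInv ub (pre ++ [j]) (some b, some (PySem.List.pyGetD ub j 0), bi) := by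
                    refine ⟨by simp [hbi], hval, ?_, ⟨j, by simp, fun h => hbij h.symm, rfl⟩, ?_⟩
                    · intro j' hj'
                      rcases (List.mem_append.mp hj') with h | h
                      · exact hub j' h
                      · simp at h; subst h; exact hvb
                    · intro j' hj' hne
                      rcases (List.mem_append.mp hj') with h | h
                      · exact le_of_lt (lt_of_le_of_lt (hbnd j' h hne) hvs)
                      · simp at h; subst h; exact le_refl _
                  have := ih (pre ++ [j]) _ hnd' hstep
                  rw [hfin] at this
                  simpa [bScan, not_lt.mpr hvb, hvs] using this
                · push Not at hvs
                  have hstep : scanInv ub (pre ++ [j]) (some b, some s, bi) := by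
                    refine ⟨by simp [hbi], hval, ?_, ⟨j0, by simp [hj0], hj0ne, hj0v⟩, ?_⟩
                    · intro j' hj'
                      rcases (List.mem_append.mp hj') with h | h
                      · exact hub j' h
                      · simp at h; subst h; exact hvb
                    · intro j' hj' hne
                      rcases (List.mem_append.mp hj') with h | h
                      · exact hbnd j' h hne
                      · simp at h; subst h; exact hvs
                  have := ih (pre ++ [j]) _ hnd' hstep
                  rw [hfin] at this
                  simpa [bScan, not_lt.mpr hvb, not_lt.mpr hvs] using this

-- A's inner loop, despite the break, decides the universal condition
theorem aInner_eq_all (lb ub : List Int) (i : Int) : ∀ js : List Int,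
    aInner lb ub i js
      = js.all (fun j => decide (j = i) || decide (PySem.List.pyGetD ub j 0 < PySem.List.pyGetD lb i 0)) := by
  intro js
  induction js with
  | nil => simp [aInner]
  | cons j js ih =>
      by_cases hji : j = i
      · simp [aInner, hji, ih]
      · by_cases hle : PySem.List.pyGetD lb i 0 ≤ PySem.List.pyGetD ub j 0
        · simp [aInner, hji, hle, not_lt.mpr hle]
        · push Not at hle
          simp [aInner, hji, not_le.mpr hle, hle, ih]

-- per-candidate agreement: A's inner check equals B's O(1) check against the scan state
theorem check_eq (lb ub : List Int) (R : List Int) (best second : Option Int) (bi i : Int)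
    (hInv : scanInv ub R (best, second, bi)) (hi : 0 ≤ i) :
    aInner lb ub i R
      = (match (if i = bi then second else best) with
         | none => true
         | some m => decide (PySem.List.pyGetD lb i 0 > m)) := by
  rw [aInner_eq_all]
  match best with
  | none =>
      obtain ⟨hR, hsec, hbi⟩ := hInv
      have : i ≠ bi := by omega
      subst hR hsec
      simp [this]
  | some b =>
      obtain ⟨hbi, hval, hub, hsec⟩ := hInv
      by_cases hibi : i = bi
      · subst hibi
        rw [if_pos rfl]
        match second with
        | none =>
            simp only [List.all_eq_true, Bool.or_eq_true, decide_eq_true_eq]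
            intro j hj
            exact Or.inl ((show ∀ j ∈ R, j = i from hsec) j hj)
        | some s =>
            obtain ⟨⟨j0, hj0, hj0ne, hj0v⟩, hbnd⟩ := hsec
            rw [Bool.eq_iff_iff]
            simp only [List.all_eq_true, Bool.or_eq_true, decide_eq_true_eq]
            constructor
            · intro h
              rcases h j0 hj0 with h' | h'
              · exact absurd h' hj0ne
              · exact hj0v ▸ h'
            · intro h j hj
              by_cases hji : j = i
              · exact Or.inl hji
              · exact Or.inr (lt_of_le_of_lt (hbnd j hj hji) h)
      · have hbii : bi ≠ i := fun h => hibi h.symm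
        simp only [if_neg hibi]
        rw [Bool.eq_iff_iff]
        simp only [List.all_eq_true, Bool.or_eq_true, decide_eq_true_eq]
        constructor
        · intro h
          rcases h bi hbi with h' | h'
          · exact absurd h' hbii
          · exact hval ▸ h'
        · intro h j hj
          by_cases hji : j = i
          · exact Or.inl hji
          · exact Or.inr (lt_of_le_of_lt (hub j hj) h)

-- the two outer search loops agree element-wise, hence on the result
theorem find_eq (lb ub : List Int) (n : Int) (best second : Option Int) (bi : Int) :
    ∀ is : List Int,
    (∀ i ∈ is, aInner lb ub i (PySem.List.pyRange 0 n 1)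
        = (match (if i = bi then second else best) with
           | none => true
           | some m => decide (PySem.List.pyGetD lb i 0 > m))) →
    aOuter lb ub n is = bFind lb best second bi is := by
  intro is
  induction is with
  | nil => intro _; rfl
  | cons i is ih =>
      intro h
      have hi := h i (by simp)
      have hrest : ∀ i' ∈ is, _ := fun i' hi' => h i' (by simp [hi'])
      simp only [aOuter, bFind, hi]
      match hm : (if i = bi then second else best) with
      | none => simp
      | some m =>
          by_cases hgt : PySem.List.pyGetD lb i 0 > m
          · simp [hgt]
          · simp [hgt, ih hrest]

-- ===== VERDICT (by name: the statement is the Claim_ definition above) =====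
theorem predict_label_spec : Claim_equal_predict_label := by
  intro lb ub _ _
  unfold Spec_predict_label predict_label predict_label_alt
  have hInv0 : scanInv ub [] (none, none, -1) := by simp [scanInv]
  have hnd : (([] : List Int) ++ PySem.List.pyRange 0 (lb.length : Int) 1).Nodup := by
    simpa using PySem.List.nodup_pyRange_one (a := 0) (b := (lb.length : Int))
  have hInv := bScan_inv ub (PySem.List.pyRange 0 (lb.length : Int) 1) [] (none, none, -1) hnd hInv0
  simp only [List.nil_append] at hInv
  rcases hst : bScan ub (none, none, -1) (PySem.List.pyRange 0 (lb.length : Int) 1) with ⟨best, second, bi⟩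
  rw [hst] at hInv
  show aOuter lb ub (lb.length : Int) (PySem.List.pyRange 0 (lb.length : Int) 1)
      = (match bScan ub (none, none, -1) (PySem.List.pyRange 0 (lb.length : Int) 1) with
         | (best, second, bi) => bFind lb best second bi (PySem.List.pyRange 0 (lb.length : Int) 1))
  rw [hst]
  apply find_eq
  intro i hiR
  exact check_eq lb ub _ best second bi i hInv ((PySem.List.mem_pyRange_one).mp hiR).1
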